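-- pv_equiv track=rewrite | github.com/vosslab/biology-problems | biochemistry-problems/buffers/bufferslib.py | format_chemical_formula_html
-- ===== SOURCE A (Python) =====
-- def format_chemical_formula_html(chem_state, color=None):
-- 	string_list = list(chem_state)
-- 	chem_form = ''
-- 	charge = None
-- 	for character in string_list:
-- 		if charge is not None:
-- 			if character == '1':
-- 				chem_form += '<sup>{0}</sup>'.format(charge)
-- 			else:
-- 				chem_form += '<sup>{0}{1}</sup>'.format(character, charge)
-- 		elif character == '-' or character == '+':
-- 			charge = character
-- 		elif character.isalpha():
-- 			chem_form += character
-- 		elif character.isdigit():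
-- 			chem_form += '<sub>{0}</sub>'.format(character)
--
-- 		else:
-- 			chem_form += character
-- 	if color is not None:
-- 		chem_form = f'<span style="color: {color}">{chem_form}</span>'
-- 	return chem_form
-- ===== SOURCE B (Python) =====
-- def _plain(c):
-- 	if c.isalpha():
-- 		return c
-- 	if c.isdigit():
-- 		return '<sub>{0}</sub>'.format(c)
-- 	return c
--
-- def format_chemical_formula_html(chem_state, color=None):
-- 	pos = None
-- 	for i, c in enumerate(chem_state):
-- 		if c == '+' or c == '-':
-- 			pos = i
-- 			break
-- 	if pos is None:
-- 		body = ''.join(_plain(c) for c in chem_state)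
-- 	else:
-- 		charge = chem_state[pos]
-- 		body = ''.join(_plain(c) for c in chem_state[:pos])
-- 		body += ''.join(
-- 			'<sup>{0}</sup>'.format(charge) if c == '1'
-- 			else '<sup>{0}{1}</sup>'.format(c, charge)
-- 			for c in chem_state[pos + 1:])
-- 	if color is not None:
-- 		body = f'<span style="color: {color}">{body}</span>'
-- 	return body
-- ===== Notes on version B (the rewrite author's own statement) =====
-- stated objective: alternative
-- what changed: B replaces A's single stateful pass (a never-reset 'charge' flag threaded through every iteration) by an explicit two-region decomposition: find the index of the first charge-sign character, map the prefix with a plain char formatter and the suffix with a superscript formatter, then wrap.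
import Mathlib
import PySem

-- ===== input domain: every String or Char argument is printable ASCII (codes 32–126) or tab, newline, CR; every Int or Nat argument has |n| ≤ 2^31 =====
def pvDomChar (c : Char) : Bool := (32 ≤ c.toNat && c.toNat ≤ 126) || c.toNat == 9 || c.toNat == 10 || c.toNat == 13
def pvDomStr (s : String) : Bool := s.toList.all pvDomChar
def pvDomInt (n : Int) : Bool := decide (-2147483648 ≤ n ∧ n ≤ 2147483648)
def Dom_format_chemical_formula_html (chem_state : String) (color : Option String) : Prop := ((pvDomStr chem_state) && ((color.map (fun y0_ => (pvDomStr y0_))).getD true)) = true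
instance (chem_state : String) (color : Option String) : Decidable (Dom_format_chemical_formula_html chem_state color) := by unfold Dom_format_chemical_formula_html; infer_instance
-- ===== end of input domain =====

-- B replaces A's single stateful pass (never-reset 'charge' flag) by an explicit two-region
-- decomposition (prefix before the first charge-sign character, suffix after it); same cost, objective: alternative.

-- ===== PORT A =====
-- A's loop: state = (accumulated chem_form, charge : Option Char), branches in A's order.
def pvFmtA : List Char → List Char → Option Char → List Char
  | [], acc, _ => acc
  | c :: rest, acc, charge =>
    match charge with
    | some ch =>
      pvFmtA rest (acc ++ (if c = '1' then "<sup>".toList ++ [ch] ++ "</sup>".toList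
                           else "<sup>".toList ++ [c, ch] ++ "</sup>".toList)) (some ch)
    | none =>
      if c = '-' ∨ c = '+' then pvFmtA rest acc (some c)
      else if PySem.Chars.isalpha c then pvFmtA rest (acc ++ [c]) none
      else if PySem.Chars.isdigit c then
        pvFmtA rest (acc ++ ("<sub>".toList ++ [c] ++ "</sub>".toList)) none
      else pvFmtA rest (acc ++ [c]) none

def format_chemical_formula_html (chem_state : String) (color : Option String) : String :=
  let chem_form := pvFmtA chem_state.toList [] none
  match color with
  | some col => String.mk ("<span style=\"color: ".toList ++ col.toList ++ "\">".toList ++ chem_form ++ "</span>".toList)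
  | none => String.mk chem_form

-- ===== PORT B =====
def pvPlain (c : Char) : List Char :=
  if PySem.Chars.isalpha c then [c]
  else if PySem.Chars.isdigit c then "<sub>".toList ++ [c] ++ "</sub>".toList
  else [c]

def pvSup (charge : Char) (c : Char) : List Char :=
  if c = '1' then "<sup>".toList ++ [charge] ++ "</sup>".toList
  else "<sup>".toList ++ [c, charge] ++ "</sup>".toList

def pvBodyB (cs : List Char) : List Char :=
  match cs.findIdx? (fun c => c = '+' || c = '-') with
  | none => (cs.map pvPlain).flatten
  | some i =>
    let charge := cs.getD i ' '
    ((cs.take i).map pvPlain).flatten ++ (((cs.drop (i + 1)).map (pvSup charge)).flatten)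

def format_chemical_formula_html_alt (chem_state : String) (color : Option String) : String :=
  let body := pvBodyB chem_state.toList
  match color with
  | some col => String.mk ("<span style=\"color: ".toList ++ col.toList ++ "\">".toList ++ body ++ "</span>".toList)
  | none => String.mk body

-- ===== PRECONDITION & SPEC =====
def Spec_format_chemical_formula_html (chem_state : String) (color : Option String) (out : String) : Prop := out = format_chemical_formula_html_alt chem_state color
instance (chem_state : String) (color : Option String) (out : String) : Decidable (Spec_format_chemical_formula_html chem_state color out) := by unfold Spec_format_chemical_formula_html; infer_instance

-- ===== CLAIM (what is proved, stated in full; the proofs are below) =====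
def Claim_equal_format_chemical_formula_html : Prop := ∀ (chem_state : String) (color : Option String), Dom_format_chemical_formula_html chem_state color → Spec_format_chemical_formula_html chem_state color (format_chemical_formula_html chem_state color)

-- ===== LEMMAS AND PROOFS =====

-- Once A's charge is set it never resets: the rest of the loop is B's superscript map.
theorem pvFmtA_some (cs : List Char) : ∀ (acc : List Char) (ch : Char),
    pvFmtA cs acc (some ch) = acc ++ (cs.map (pvSup ch)).flatten := by
  induction cs with
  | nil => intro acc ch; simp [pvFmtA]
  | cons c rest ih =>
    intro acc ch
    simp only [pvFmtA, ih, pvSup, List.map_cons, List.flatten_cons]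
    split <;> simp

theorem pvBodyB_cons_not_delim (c : Char) (rest : List Char)
    (h : (c = '+' || c = '-') = false) :
    pvBodyB (c :: rest) = pvPlain c ++ pvBodyB rest := by
  unfold pvBodyB
  rw [List.findIdx?_cons, h]
  cases hr : rest.findIdx? (fun c => c = '+' || c = '-') with
  | none => simp
  | some i => simp

-- A's pass with charge unset computes B's two-region body.
theorem pvFmtA_none (cs : List Char) : ∀ (acc : List Char),
    pvFmtA cs acc none = acc ++ pvBodyB cs := by
  induction cs with
  | nil => intro acc; simp [pvFmtA, pvBodyB]
  | cons c rest ih =>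
    intro acc
    by_cases hd : c = '-' ∨ c = '+'
    · have hc : (decide (c = '+') || decide (c = '-')) = true := by
        rcases hd with h | h <;> simp [h]
      simp only [pvFmtA, if_pos hd, pvFmtA_some]
      unfold pvBodyB
      rw [List.findIdx?_cons]
      simp [hc]
    · have hc : (decide (c = '+') || decide (c = '-')) = false := by
        simp only [Bool.or_eq_false_iff, decide_eq_false_iff_not]
        exact ⟨fun h => hd (Or.inr h), fun h => hd (Or.inl h)⟩
      rw [pvBodyB_cons_not_delim c rest hc]
      simp only [pvFmtA, if_neg hd]
      by_cases ha : PySem.Chars.isalpha c = true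
      · rw [if_pos ha, ih]; simp [pvPlain, ha]
      · rw [if_neg ha]
        by_cases hdg : PySem.Chars.isdigit c = true
        · rw [if_pos hdg, ih]; simp [pvPlain, ha, hdg]
        · rw [if_neg hdg, ih]; simp [pvPlain, ha, hdg]

-- ===== VERDICT (by name: the statement is the Claim_ definition above) =====
theorem format_chemical_formula_html_spec : Claim_equal_format_chemical_formula_html := by
  intro chem_state color _
  unfold Spec_format_chemical_formula_html format_chemical_formula_html format_chemical_formula_html_alt
  rw [pvFmtA_none]
  simp
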